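-- pv_equiv track=rewrite | github.com/leoredrum/audiobook-pipeline | scripts/batch_easyvoice.py | merge_small_chapters
-- ===== SOURCE A (Python) =====
-- CHARS_PER_SEGMENT = 15000
--
-- def merge_small_chapters(chapters, min_chars=CHARS_PER_SEGMENT):
--     merged, buf_t, buf_b, buf_len = [], [], [], 0
--     for title, body in chapters:
--         buf_t.append(title)
--         buf_b.append(body)
--         buf_len += len(body)
--         if buf_len >= min_chars:
--             label = f"{buf_t[0]} ~ {buf_t[-1]}" if len(buf_t) > 1 else buf_t[0]
--             merged.append((label, "\n\n".join(buf_b)))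
--             buf_t, buf_b, buf_len = [], [], 0
--     if buf_b:
--         label = f"{buf_t[0]} ~ {buf_t[-1]}" if len(buf_t) > 1 else buf_t[0]
--         merged.append((label, "\n\n".join(buf_b)))
--     return merged
-- ===== SOURCE B (Python) =====
-- CHARS_PER_SEGMENT = 15000
--
-- def merge_small_chapters(chapters, min_chars=CHARS_PER_SEGMENT):
--     # Pass 1: cut the chapter list into consecutive groups, each the shortest
--     # prefix of the remainder whose body lengths sum to >= min_chars (the
--     # trailing remainder forms the last group even if short).
--     def split_index(rest):
--         total, i = 0, 0
--         for _, body in rest: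
--             total += len(body)
--             i += 1
--             if total >= min_chars:
--                 break
--         return i
--     groups = []
--     rest = list(chapters)
--     while rest:
--         i = split_index(rest)
--         groups.append(rest[:i])
--         rest = rest[i:]
--     # Pass 2: format each group as (label, joined body).
--     out = []
--     for g in groups:
--         titles = [t for t, _ in g]
--         label = f"{titles[0]} ~ {titles[-1]}" if len(titles) > 1 else titles[0]
--         out.append((label, "\n\n".join(b for _, b in g)))
--     return out
-- ===== Notes on version B (the rewrite author's own statement) =====
-- stated objective: simpler
-- what changed: Replaces A's single stateful fold over four parallel buffers (titles, bodies, running length, flush-inside-loop plus a duplicated trailing flush) by two passes: a splitting pass that repeatedly cuts off the shortest prefix whose body lengths reach min_chars, then a formatting pass over the groups, so the label/join code appears once and no buffer state is threaded.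
import Mathlib
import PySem

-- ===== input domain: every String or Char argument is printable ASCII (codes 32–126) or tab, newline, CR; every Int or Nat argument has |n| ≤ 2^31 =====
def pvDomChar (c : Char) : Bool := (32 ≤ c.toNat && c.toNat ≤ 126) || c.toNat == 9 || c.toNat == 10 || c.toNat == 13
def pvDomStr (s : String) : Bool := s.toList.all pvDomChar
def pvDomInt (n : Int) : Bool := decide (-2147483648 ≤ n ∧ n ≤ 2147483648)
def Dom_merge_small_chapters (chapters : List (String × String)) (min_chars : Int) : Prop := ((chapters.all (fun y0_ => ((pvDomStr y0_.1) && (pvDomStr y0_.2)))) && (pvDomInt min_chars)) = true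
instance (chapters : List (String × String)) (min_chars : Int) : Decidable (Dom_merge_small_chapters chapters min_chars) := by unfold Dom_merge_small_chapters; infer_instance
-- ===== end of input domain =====

-- B replaces A's stateful buffer-threading fold (with a duplicated trailing flush) by two
-- passes: cut the list into shortest prefixes reaching min_chars, then format each group once.


-- ===== PORT A =====
-- label = f"{buf_t[0]} ~ {buf_t[-1]}" if len(buf_t) > 1 else buf_t[0]; followed by "\n\n".join(buf_b).
-- buf_t is nonempty at every call site (A appends before flushing, and the trailing flush is
-- guarded by `if buf_b:`), so the .getD "" default of the pyGet? accesses is never taken.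
def flushA (buf_t buf_b : List String) : String × String :=
  (if buf_t.length > 1
     then ((PySem.List.pyGet? buf_t 0).getD "") ++ " ~ " ++ ((PySem.List.pyGet? buf_t (-1)).getD "")
     else (PySem.List.pyGet? buf_t 0).getD "",
   PySem.Str.join "\n\n" buf_b)

-- the `for title, body in chapters` loop, state = (merged, buf_t, buf_b, buf_len);
-- the [] case is the `if buf_b:` trailing flush after the loop.
def loopA (chapters : List (String × String)) (merged : List (String × String))
    (buf_t buf_b : List String) (buf_len : Int) (min_chars : Int) : List (String × String) :=
  match chapters with
  | [] => if buf_b = [] then merged else merged ++ [flushA buf_t buf_b]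
  | (title, body) :: rest =>
    let buf_t' := buf_t ++ [title]
    let buf_b' := buf_b ++ [body]
    let buf_len' := buf_len + PySem.Str.len body
    if buf_len' ≥ min_chars then
      loopA rest (merged ++ [flushA buf_t' buf_b']) [] [] 0 min_chars
    else
      loopA rest merged buf_t' buf_b' buf_len' min_chars

def merge_small_chapters (chapters : List (String × String)) (min_chars : Int) : List (String × String) :=
  loopA chapters [] [] [] 0 min_chars

-- ===== PORT B =====
-- split_index: the for-loop over `rest` accumulating total, breaking once total >= min_chars.
def splitIndex (rest : List (String × String)) (total : Int) (min_chars : Int) : Nat :=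
  match rest with
  | [] => 0
  | (_, body) :: rs =>
    if total + PySem.Str.len body ≥ min_chars then 1
    else 1 + splitIndex rs (total + PySem.Str.len body) min_chars

theorem splitIndex_pos (c : String × String) (rs : List (String × String)) (t m : Int) :
    1 ≤ splitIndex (c :: rs) t m := by
  obtain ⟨_, _⟩ := c
  unfold splitIndex
  split <;> omega

-- the `while rest:` grouping pass
def groupsB (rest : List (String × String)) (min_chars : Int) : List (List (String × String)) :=
  match rest with
  | [] => []
  | c :: rs =>
    let i := splitIndex (c :: rs) 0 min_chars
    (c :: rs).take i :: groupsB ((c :: rs).drop i) min_chars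
termination_by rest.length
decreasing_by
  simp only [List.length_drop]
  have := splitIndex_pos c rs 0 min_chars
  simp [List.length_cons]
  omega

-- the formatting pass over one group
def formatB (g : List (String × String)) : String × String :=
  let titles := g.map Prod.fst
  ((if titles.length > 1
      then ((PySem.List.pyGet? titles 0).getD "") ++ " ~ " ++ ((PySem.List.pyGet? titles (-1)).getD "")
      else (PySem.List.pyGet? titles 0).getD ""),
   PySem.Str.join "\n\n" (g.map Prod.snd))

def merge_small_chapters_alt (chapters : List (String × String)) (min_chars : Int) : List (String × String) :=
  (groupsB chapters min_chars).map formatB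

-- ===== PRECONDITION & SPEC =====
def Spec_merge_small_chapters (chapters : List (String × String)) (min_chars : Int) (out : List (String × String)) : Prop := out = merge_small_chapters_alt chapters min_chars
instance (chapters : List (String × String)) (min_chars : Int) (out : List (String × String)) : Decidable (Spec_merge_small_chapters chapters min_chars out) := by unfold Spec_merge_small_chapters; infer_instance

-- ===== CLAIM (what is proved, stated in full; the proofs are below) =====
def Claim_equal_merge_small_chapters : Prop := ∀ (chapters : List (String × String)) (min_chars : Int), Dom_merge_small_chapters chapters min_chars → Spec_merge_small_chapters chapters min_chars (merge_small_chapters chapters min_chars)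

-- ===== LEMMAS AND PROOFS =====

theorem splitIndex_cons (ti bo : String) (rs : List (String × String)) (t m : Int) :
    splitIndex ((ti, bo) :: rs) t m
      = if t + PySem.Str.len bo ≥ m then 1 else 1 + splitIndex rs (t + PySem.Str.len bo) m := rfl


-- sum of body lengths of a list of (title, body) pairs
def sumB (l : List (String × String)) : Int := (l.map (fun p => PySem.Str.len p.2)).sum

theorem sumB_nil : sumB [] = 0 := rfl

theorem sumB_cons (c : String × String) (l : List (String × String)) :
    sumB (c :: l) = PySem.Str.len c.2 + sumB l := by
  simp [sumB]

theorem sumB_append (l₁ l₂ : List (String × String)) :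
    sumB (l₁ ++ l₂) = sumB l₁ + sumB l₂ := by
  simp [sumB]

theorem len_nonneg (s : String) : 0 ≤ PySem.Str.len s := by
  simp [PySem.Str.len_eq]

theorem sumB_nonneg (l : List (String × String)) : 0 ≤ sumB l := by
  induction l with
  | nil => simp [sumB]
  | cons c t ih => rw [sumB_cons]; have := len_nonneg c.2; omega

theorem sumB_take_le (l : List (String × String)) (n : Nat) : sumB (l.take n) ≤ sumB l := by
  induction l generalizing n with
  | nil => simp
  | cons c t ih =>
    cases n with
    | zero => simpa [sumB] using sumB_nonneg (c :: t)
    | succ n =>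
      rw [List.take_succ_cons, sumB_cons, sumB_cons]
      have := ih n
      omega

-- splitIndex scans past a prefix none of whose partial sums reach min_chars
theorem splitIndex_append (p q : List (String × String)) (t m : Int)
    (h : ∀ k : Nat, k < p.length → t + sumB (p.take (k + 1)) < m) :
    splitIndex (p ++ q) t m = p.length + splitIndex q (t + sumB p) m := by
  induction p generalizing t with
  | nil => simp [sumB_nil]
  | cons c p' ih =>
    obtain ⟨ti, bo⟩ := c
    have h0 := h 0 (by simp)
    rw [List.take_succ_cons, List.take_zero, sumB_cons] at h0
    simp only [sumB_nil] at h0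
    rw [List.cons_append, splitIndex_cons, if_neg (by omega)]
    have ih' := ih (t + PySem.Str.len bo) (fun k hk => by
      have := h (k + 1) (by simp; omega)
      rw [List.take_succ_cons, sumB_cons] at this
      dsimp only at this
      omega)
    rw [ih', List.length_cons, sumB_cons]
    have harg : t + (PySem.Str.len bo + sumB p') = t + PySem.Str.len bo + sumB p' := by ring
    dsimp only
    rw [harg]
    omega

theorem groupsB_ne_nil (l : List (String × String)) (m : Int) (h : l ≠ []) :
    groupsB l m = l.take (splitIndex l 0 m) :: groupsB (l.drop (splitIndex l 0 m)) m := by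
  cases l with
  | nil => exact absurd rfl h
  | cons c rs => rw [groupsB]

-- the main invariant: running A's loop from buffer state (buf_t, buf_b, buf_len)
-- equals B run on the zipped buffer contents prepended to the remaining chapters
theorem formatB_zip (buf_t buf_b : List String) (h : buf_t.length = buf_b.length) :
    formatB (buf_t.zip buf_b) = flushA buf_t buf_b := by
  unfold formatB flushA
  rw [List.map_fst_zip (le_of_eq h), List.map_snd_zip (le_of_eq h.symm)]

-- no partial sum of the zipped buffer reaches min_chars (the buffer was never flushed)
theorem zip_prefix_cond (buf_t buf_b : List String) (buf_len m : Int)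
    (hlen : buf_t.length = buf_b.length)
    (hsum : buf_len = sumB (buf_t.zip buf_b))
    (hlt : buf_b ≠ [] → buf_len < m) :
    ∀ k : Nat, k < (buf_t.zip buf_b).length → 0 + sumB ((buf_t.zip buf_b).take (k + 1)) < m := by
  intro k hk
  have hbb : buf_b ≠ [] := by
    intro hb; subst hb; simp at hk
  have h1 := sumB_take_le (buf_t.zip buf_b) (k + 1)
  have h2 := hlt hbb
  omega

theorem loopA_eq (chapters : List (String × String)) (buf_t buf_b : List String)
    (buf_len : Int) (merged : List (String × String)) (m : Int)
    (hlen : buf_t.length = buf_b.length)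
    (hsum : buf_len = sumB (buf_t.zip buf_b))
    (hlt : buf_b ≠ [] → buf_len < m) :
    loopA chapters merged buf_t buf_b buf_len m
      = merged ++ merge_small_chapters_alt (buf_t.zip buf_b ++ chapters) m := by
  induction chapters generalizing buf_t buf_b buf_len merged with
  | nil =>
    rw [loopA]
    by_cases hbb : buf_b = []
    · subst hbb
      simp [merge_small_chapters_alt, groupsB]
    · rw [if_neg hbb]
      have hzne : buf_t.zip buf_b ≠ [] := by
        intro hz
        have : (buf_t.zip buf_b).length = 0 := by rw [hz]; rfl
        rw [List.length_zip, hlen, Nat.min_self] at this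
        exact hbb (List.length_eq_zero_iff.mp this)
      have hsi : splitIndex (buf_t.zip buf_b) 0 m = (buf_t.zip buf_b).length := by
        have := splitIndex_append (buf_t.zip buf_b) [] 0 m
          (zip_prefix_cond buf_t buf_b buf_len m hlen hsum hlt)
        simpa [splitIndex] using this
      rw [List.append_nil, merge_small_chapters_alt, groupsB_ne_nil _ _ hzne, hsi,
        List.take_length, List.drop_length]
      simp [groupsB, formatB_zip buf_t buf_b hlen]
  | cons c rest ih =>
    obtain ⟨title, body⟩ := c
    rw [loopA]
    by_cases hge : buf_len + PySem.Str.len body ≥ m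
    · rw [if_pos hge]
      rw [ih [] [] 0 _ rfl rfl (by simp)]
      simp only [List.zip_nil_left, List.nil_append]
      have hsi : splitIndex (buf_t.zip buf_b ++ (title, body) :: rest) 0 m
          = (buf_t.zip buf_b).length + 1 := by
        rw [splitIndex_append _ _ _ _ (zip_prefix_cond buf_t buf_b buf_len m hlen hsum hlt),
          splitIndex_cons, if_pos (by omega)]
      have hzip : (buf_t ++ [title]).zip (buf_b ++ [body])
          = buf_t.zip buf_b ++ [(title, body)] := by
        rw [List.zip_append hlen]; rfl
      have hne : buf_t.zip buf_b ++ (title, body) :: rest ≠ [] := by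
        cases buf_t.zip buf_b <;> simp
      conv_rhs => rw [merge_small_chapters_alt, groupsB_ne_nil _ _ hne, hsi,
        List.take_append, List.drop_append]
      simp only [List.take_of_length_le (le_of_lt (Nat.lt_succ_self _)),
        Nat.add_sub_cancel_left, List.take_succ_cons, List.take_zero,
        List.drop_of_length_le (le_of_lt (Nat.lt_succ_self _)), List.drop_succ_cons,
        List.drop_zero, List.nil_append, List.map_cons]
      rw [← hzip, formatB_zip _ _ (by simp [hlen]), List.append_assoc]
      simp [merge_small_chapters_alt]
    · rw [if_neg hge]
      have hzip : (buf_t ++ [title]).zip (buf_b ++ [body])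
          = buf_t.zip buf_b ++ [(title, body)] := by
        rw [List.zip_append hlen]; rfl
      rw [ih (buf_t ++ [title]) (buf_b ++ [body]) _ merged (by simp [hlen])
        (by rw [hzip, sumB_append, hsum]; simp [sumB]) (fun _ => by omega)]
      rw [hzip, List.append_assoc]
      rfl

-- ===== VERDICT (by name: the statement is the Claim_ definition above) =====
theorem merge_small_chapters_spec : Claim_equal_merge_small_chapters := by
  intro chapters min_chars _
  unfold Spec_merge_small_chapters merge_small_chapters
  simpa using loopA_eq chapters [] [] 0 [] min_chars rfl rfl (by simp)
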